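-- pv_equiv track=rewrite | github.com/harrybraden/monopole | data.py | reflect_symmetries
-- ===== SOURCE A (Python) =====
-- import copy
--
-- def reflect_symmetries(positive_quadrant):
--     bottom_right_quadrant = positive_quadrant
--     top_right_quadrant = copy.deepcopy(bottom_right_quadrant)
--     top_right_quadrant.reverse()
--
--     right_half = top_right_quadrant + bottom_right_quadrant
--
--     left_half = copy.deepcopy(right_half)
--     for a in left_half:
--         a.reverse()
--     full = []
--     for i in range(0, len(right_half)):
--         full.append(None)
--         full[i] = left_half[i] + right_half[i]
--
--     return full
-- ===== SOURCE B (Python) =====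
-- def reflect_symmetries(positive_quadrant):
--     n = len(positive_quadrant)
--     full = []
--     for i in range(2 * n):
--         qi = i - n if i >= n else n - 1 - i
--         srow = positive_quadrant[qi]
--         L = len(srow)
--         row = []
--         for j in range(2 * L):
--             row.append(srow[L - 1 - j] if j < L else srow[j - L])
--         full.append(row)
--     return full
-- ===== Notes on version B (the rewrite author's own statement) =====
-- stated objective: simpler
-- what changed: Builds the full grid directly by reflected-index construction (one pass over output indices computing each source cell) instead of deepcopy+reverse mirror halves and concatenation.
import Mathlib
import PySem

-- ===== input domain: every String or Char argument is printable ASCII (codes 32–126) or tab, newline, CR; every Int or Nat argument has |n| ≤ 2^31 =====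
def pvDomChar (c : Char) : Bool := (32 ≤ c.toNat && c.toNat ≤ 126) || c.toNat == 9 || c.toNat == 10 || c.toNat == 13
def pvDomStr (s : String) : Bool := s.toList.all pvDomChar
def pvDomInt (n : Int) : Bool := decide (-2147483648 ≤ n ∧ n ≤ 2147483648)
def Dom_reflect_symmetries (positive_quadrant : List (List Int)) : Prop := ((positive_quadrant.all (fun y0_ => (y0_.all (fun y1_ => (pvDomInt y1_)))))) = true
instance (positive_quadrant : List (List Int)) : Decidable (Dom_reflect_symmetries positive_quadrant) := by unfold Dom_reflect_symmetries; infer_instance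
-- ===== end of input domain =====

-- B builds the full grid directly by reflected-index construction (simpler: one pass over output
-- indices) instead of A's deepcopy+reverse mirrored halves and concatenation; same return value.

-- ===== PORT A =====
-- A's loop 'for i in range(0, len(right_half)): full.append(...); full[i] = left[i] + right[i]'
-- indexes only in-range positions, so getD with dummy default [] is exact.
def reflect_symmetries (positive_quadrant : List (List Int)) : List (List Int) :=
  let bottom_right_quadrant := positive_quadrant
  let top_right_quadrant := bottom_right_quadrant.reverse
  let right_half := top_right_quadrant ++ bottom_right_quadrant
  let left_half := right_half.map List.reverse
  (List.range right_half.length).foldl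
    (fun full i => full ++ [left_half.getD i [] ++ right_half.getD i []]) []

-- ===== PORT B =====
-- B's inner loop over j in range(2*L); Python indexing is always in range here, so getD 0 is exact.
def pvRowB (srow : List Int) : List Int :=
  (List.range (2 * srow.length)).map
    (fun j => if j < srow.length then srow.getD (srow.length - 1 - j) 0
              else srow.getD (j - srow.length) 0)

def reflect_symmetries_alt (positive_quadrant : List (List Int)) : List (List Int) :=
  let n := positive_quadrant.length
  (List.range (2 * n)).map
    (fun i =>
      let qi := if n ≤ i then i - n else n - 1 - i
      pvRowB (positive_quadrant.getD qi []))

-- ===== PRECONDITION & SPEC =====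
def Spec_reflect_symmetries (positive_quadrant : List (List Int)) (out : List (List Int)) : Prop := out = reflect_symmetries_alt positive_quadrant
instance (positive_quadrant : List (List Int)) (out : List (List Int)) : Decidable (Spec_reflect_symmetries positive_quadrant out) := by unfold Spec_reflect_symmetries; infer_instance

-- ===== CLAIM (what is proved, stated in full; the proofs are below) =====
def Claim_equal_reflect_symmetries : Prop := ∀ (positive_quadrant : List (List Int)), Dom_reflect_symmetries positive_quadrant → Spec_reflect_symmetries positive_quadrant (reflect_symmetries positive_quadrant)

-- ===== LEMMAS AND PROOFS =====

-- A's append-accumulating fold over range produces a map over range.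
theorem pv_foldl_range_append {α : Type} (f : Nat → α) :
    ∀ (n : Nat) (init : List α),
      (List.range n).foldl (fun acc i => acc ++ [f i]) init = init ++ (List.range n).map f := by
  intro n
  induction n with
  | zero => intro init; simp
  | succ m ih =>
    intro init
    rw [List.range_succ, List.foldl_append, ih]
    simp

-- B's row construction is reverse-and-append of the source row
theorem pv_rowB_eq (srow : List Int) : pvRowB srow = srow.reverse ++ srow := by
  apply List.ext_getElem
  · simp [pvRowB, two_mul]
  · intro j h1 h2
    simp only [pvRowB, List.getElem_map, List.getElem_range, List.length_map, List.length_range] at h1 ⊢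
    by_cases hj : j < srow.length
    · rw [if_pos hj, List.getElem_append_left (by simpa using hj), List.getElem_reverse]
      rw [List.getD_eq_getElem?_getD,
        List.getElem?_eq_getElem (show srow.length - 1 - j < srow.length by omega)]
      rfl
    · rw [if_neg hj, List.getElem_append_right (by simpa using hj)]
      rw [List.getD_eq_getElem?_getD,
        List.getElem?_eq_getElem (show j - srow.length < srow.length by omega)]
      simp

-- A equals the row-map characterisation
theorem pv_A_eq (Q : List (List Int)) :
    reflect_symmetries Q = (Q.reverse ++ Q).map (fun r => r.reverse ++ r) := by
  unfold reflect_symmetries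
  rw [pv_foldl_range_append, List.nil_append]
  apply List.ext_getElem
  · simp
  · intro i h1 h2
    simp only [List.length_map, List.length_range, List.length_append, List.length_reverse] at h1
    simp only [List.getElem_map, List.getElem_range]
    have hlt : i < (Q.reverse ++ Q).length := by simp; omega
    rw [List.getD_eq_getElem?_getD, List.getElem?_map, List.getElem?_eq_getElem hlt]
    rw [List.getD_eq_getElem?_getD, List.getElem?_eq_getElem hlt]
    simp

-- B equals the row-map characterisation
theorem pv_B_eq (Q : List (List Int)) :
    reflect_symmetries_alt Q = (Q.reverse ++ Q).map (fun r => r.reverse ++ r) := by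
  unfold reflect_symmetries_alt
  apply List.ext_getElem
  · simp [two_mul]
  · intro i h1 h2
    simp only [List.getElem_map, List.getElem_range, List.length_map, List.length_range, two_mul] at h1 ⊢
    have hlt : i < (Q.reverse ++ Q).length := by simp; omega
    have key : Q.getD (if Q.length ≤ i then i - Q.length else Q.length - 1 - i) []
        = (Q.reverse ++ Q)[i]'hlt := by
      by_cases hi : Q.length ≤ i
      · rw [if_pos hi, List.getElem_append_right (by simpa using hi),
          List.getD_eq_getElem?_getD,
          List.getElem?_eq_getElem (show i - Q.length < Q.length by omega)]
        simp
      · rw [if_neg hi, List.getElem_append_left (by simp; omega), List.getElem_reverse,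
          List.getD_eq_getElem?_getD,
          List.getElem?_eq_getElem (show Q.length - 1 - i < Q.length by omega)]
        simp
    rw [key, pv_rowB_eq]

-- ===== VERDICT (by name: the statement is the Claim_ definition above) =====
theorem reflect_symmetries_spec : Claim_equal_reflect_symmetries := by
  intro Q _
  unfold Spec_reflect_symmetries
  rw [pv_A_eq, pv_B_eq]
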